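-- pv_equiv track=rewrite | github.com/LCB0B/ensemble | src/collate_fn2_new.py | find_truncation_idx
-- ===== SOURCE A (Python) =====
-- from typing import Dict, List, Tuple, Union, Literal
--
-- def find_truncation_idx(
--     event_lengths: List[int], truncate_length: int
-- ) -> Union[None, int]:
--     """Find the trucation index (returns None if not present)"""
--     if (
--         len(event_lengths) < truncate_length  # Small optimization
--         and sum(event_lengths) < truncate_length
--     ):
--         return None
--
--     n = 0
--     for i, count in enumerate(reversed(event_lengths)):
--         n += count
--         if n > truncate_length:
--             break
--     else:
--         return None
--     return -i
-- ===== SOURCE B (Python) =====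
-- def find_truncation_idx(event_lengths, truncate_length):
--     """Find the truncation index (returns None if not present)"""
--     total = sum(event_lengths)
--     if len(event_lengths) < truncate_length and total < truncate_length:
--         return None
--     running = total
--     best = None
--     for s, count in enumerate(event_lengths):
--         if running > truncate_length:
--             best = s
--         running -= count
--     if best is None:
--         return None
--     return -(len(event_lengths) - 1 - best)
-- ===== Notes on version B (the rewrite author's own statement) =====
-- stated objective: alternative
-- what changed: Replaces A's reverse iteration with a growing accumulator and first-match break by a single forward pass over a decremented suffix sum that remembers the last start index whose suffix exceeds the limit.
import Mathlib
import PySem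

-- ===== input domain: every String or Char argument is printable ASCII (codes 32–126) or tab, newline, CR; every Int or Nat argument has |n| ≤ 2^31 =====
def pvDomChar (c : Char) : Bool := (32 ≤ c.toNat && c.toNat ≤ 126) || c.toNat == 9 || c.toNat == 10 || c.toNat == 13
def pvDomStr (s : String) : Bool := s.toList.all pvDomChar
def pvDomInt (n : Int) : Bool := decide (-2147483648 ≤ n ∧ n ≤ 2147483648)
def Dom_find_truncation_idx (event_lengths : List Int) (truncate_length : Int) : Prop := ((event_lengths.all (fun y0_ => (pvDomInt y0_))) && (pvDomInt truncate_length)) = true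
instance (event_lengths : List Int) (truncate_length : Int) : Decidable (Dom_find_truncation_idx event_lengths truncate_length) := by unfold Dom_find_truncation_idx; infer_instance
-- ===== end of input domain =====

-- B replaces A's reverse scan with growing accumulator and first-match break by one
-- forward pass over a decremented suffix sum remembering the last qualifying index
-- (alternative decomposition, same cost); exact equivalence on all inputs.


-- ===== PORT A =====
-- A's loop: n accumulates over reversed(event_lengths), i is the enumerate index;
-- breaking returns -i, falling off the end (for-else) returns None.
def pvALoop (T : Int) : List Int → Int → Int → Option Int
  | [], _, _ => none
  | c :: rest, n, i =>
    let n' := n + c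
    if n' > T then some (-i) else pvALoop T rest n' (i + 1)

def find_truncation_idx (event_lengths : List Int) (truncate_length : Int) : Option Int :=
  if (event_lengths.length : Int) < truncate_length ∧ event_lengths.sum < truncate_length then
    none
  else
    pvALoop truncate_length event_lengths.reverse 0 0

-- ===== PORT B =====
-- B's loop: running holds the sum of the remaining suffix, s the enumerate index;
-- best remembers the last index whose suffix sum exceeds T.
def pvBLoop (T : Int) : List Int → Int → Int → Option Int → Option Int
  | [], _, _, best => best
  | c :: rest, running, s, best =>
    pvBLoop T rest (running - c) (s + 1) (if running > T then some s else best)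

def find_truncation_idx_alt (event_lengths : List Int) (truncate_length : Int) : Option Int :=
  let total := event_lengths.sum
  if (event_lengths.length : Int) < truncate_length ∧ total < truncate_length then
    none
  else
    match pvBLoop truncate_length event_lengths total 0 none with
    | none => none
    | some best => some (-((event_lengths.length : Int) - 1 - best))

-- ===== PRECONDITION & SPEC =====
def Spec_find_truncation_idx (event_lengths : List Int) (truncate_length : Int) (out : Option Int) : Prop := out = find_truncation_idx_alt event_lengths truncate_length
instance (event_lengths : List Int) (truncate_length : Int) (out : Option Int) : Decidable (Spec_find_truncation_idx event_lengths truncate_length out) := by unfold Spec_find_truncation_idx; infer_instance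

-- ===== CLAIM (what is proved, stated in full; the proofs are below) =====
def Claim_equal_find_truncation_idx : Prop := ∀ (event_lengths : List Int) (truncate_length : Int), Dom_find_truncation_idx event_lengths truncate_length → Spec_find_truncation_idx event_lengths truncate_length (find_truncation_idx event_lengths truncate_length)

-- ===== LEMMAS AND PROOFS =====

-- The last index k (as an offset into xs) whose suffix (xs.drop k) sums above T.
def pvLastIdx (T : Int) : List Int → Option Int
  | [] => none
  | c :: rest =>
    match pvLastIdx T rest with
    | some k => some (k + 1)
    | none => if c + rest.sum > T then some 0 else none

-- A's loop over an appended list runs the first part, then continues with its state.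
theorem pvALoop_append (T : Int) (xs ys : List Int) (n i : Int) :
    pvALoop T (xs ++ ys) n i =
      match pvALoop T xs n i with
      | some r => some r
      | none => pvALoop T ys (n + xs.sum) (i + xs.length) := by
  induction xs generalizing n i with
  | nil => simp [pvALoop]
  | cons c rest ih =>
    simp only [List.cons_append, pvALoop]
    split
    · rfl
    · rw [ih]
      simp only [List.sum_cons, List.length_cons, Nat.cast_add, Nat.cast_one]
      have e1 : n + (c + rest.sum) = n + c + rest.sum := by ring
      have e2 : i + ((rest.length : Int) + 1) = i + 1 + rest.length := by ring
      rw [e1, e2]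

-- A's reverse loop returns -(n-1-k) for the last offset k whose suffix exceeds T.
theorem pvALoop_char (T : Int) (L : List Int) :
    pvALoop T L.reverse 0 0 =
      match pvLastIdx T L with
      | some k => some (-((L.length : Int) - 1 - k))
      | none => none := by
  induction L with
  | nil => simp [pvALoop, pvLastIdx]
  | cons c rest ih =>
    rw [List.reverse_cons, pvALoop_append, ih]
    simp only [pvLastIdx]
    cases h : pvLastIdx T rest with
    | some k =>
      simp only [List.length_cons, Nat.cast_add, Nat.cast_one]
      congr 1
      ring
    | none =>
      simp only [pvALoop, List.sum_reverse, List.length_reverse, List.length_cons]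
      by_cases hgt : c + rest.sum > T
      · rw [if_pos (by linarith), if_pos hgt]
        simp only [Nat.cast_add, Nat.cast_one]
        congr 1
        ring
      · rw [if_neg (by intro h; exact hgt (by linarith)), if_neg hgt]

-- B's loop, started on the suffix sum, finds the last qualifying offset shifted by s.
theorem pvBLoop_char (T : Int) (xs : List Int) (s : Int) (b : Option Int) :
    pvBLoop T xs xs.sum s b =
      match pvLastIdx T xs with
      | some k => some (s + k)
      | none => b := by
  induction xs generalizing s b with
  | nil => simp [pvBLoop, pvLastIdx]
  | cons c rest ih =>
    simp only [pvBLoop, List.sum_cons, pvLastIdx]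
    have : c + rest.sum - c = rest.sum := by ring
    rw [this, ih]
    cases h : pvLastIdx T rest with
    | some k =>
      simp only [Option.some.injEq]
      ring
    | none =>
      by_cases hgt : c + rest.sum > T
      · rw [if_pos hgt, if_pos hgt]
        simp
      · rw [if_neg hgt, if_neg hgt]

-- ===== VERDICT (by name: the statement is the Claim_ definition above) =====
theorem find_truncation_idx_spec : Claim_equal_find_truncation_idx := by
  intro L T _
  unfold Spec_find_truncation_idx find_truncation_idx find_truncation_idx_alt
  by_cases hg : (L.length : Int) < T ∧ L.sum < T
  · rw [if_pos hg, if_pos hg]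
  · rw [if_neg hg, if_neg hg, pvALoop_char, pvBLoop_char]
    cases pvLastIdx T L with
    | none => rfl
    | some k => simp
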